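-- pv_equiv track=rewrite | github.com/muddokulovogabek-sudo/Python-Dictionary-Practice | randomusers.py | count_users_by_gender
-- ===== SOURCE A (Python) =====
-- def count_users_by_gender(data: dict) -> dict:
--     result = {}
--     for user in data["results"]:
--         gender = user["gender"]
--         if gender in result:
--             result[gender] += 1
--         else:
--             result[gender] = 1
--     return result
-- ===== SOURCE B (Python) =====
-- def count_users_by_gender(data: dict) -> dict:
--     def go(gs):
--         if not gs:
--             return {}
--         g = gs[0]
--         rest = [x for x in gs if x != g]
--         out = {g: len(gs) - len(rest)}
--         out.update(go(rest))
--         return out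
--     return go([user["gender"] for user in data["results"]])
-- ===== Notes on version B (the rewrite author's own statement) =====
-- stated objective: alternative
-- what changed: Replaces A's single-pass dict accumulator (membership test then += / init per user) with a recursive partition-and-count: extract the gender list, then repeatedly take the first gender, count it as the length drop after filtering out all its occurrences, and recurse on the filtered remainder.
import Mathlib
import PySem

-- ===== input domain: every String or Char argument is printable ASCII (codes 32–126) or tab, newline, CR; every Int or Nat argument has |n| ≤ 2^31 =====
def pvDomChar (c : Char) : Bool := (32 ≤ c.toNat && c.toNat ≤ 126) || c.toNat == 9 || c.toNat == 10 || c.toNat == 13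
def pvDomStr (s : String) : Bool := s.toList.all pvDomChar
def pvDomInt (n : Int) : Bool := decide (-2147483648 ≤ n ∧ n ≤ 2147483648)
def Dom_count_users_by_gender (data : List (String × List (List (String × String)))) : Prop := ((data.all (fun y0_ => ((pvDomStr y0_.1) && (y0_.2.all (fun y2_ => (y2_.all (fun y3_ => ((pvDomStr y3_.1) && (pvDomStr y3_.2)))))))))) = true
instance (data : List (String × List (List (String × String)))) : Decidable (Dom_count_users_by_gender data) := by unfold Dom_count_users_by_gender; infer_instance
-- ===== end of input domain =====

-- B replaces A's incremental dict accumulator with a recursive partition-and-count over the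
-- extracted gender list (count the first gender as the length drop after filtering it out,
-- recurse on the remainder); same return value, not claimed faster. Neither mutates its argument.

-- ===== PORT A =====
def count_users_by_gender (data : List (String × List (List (String × String)))) : List (String × Int) :=
  match (PySem.Dict.ofList data).get? "results" with
  | none => []   -- KeyError: excluded by Pre_
  | some users =>
    (users.foldl (fun (result : PySem.Dict String Int) user =>
        match (PySem.Dict.ofList user).get? "gender" with
        | none => result   -- KeyError: excluded by Pre_
        | some gender =>
          if result.contains gender then
            result.insert gender (result.getD gender 0 + 1)  -- result[gender] += 1 (key present)
          else
            result.insert gender 1)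
      PySem.Dict.empty).items

-- ===== PORT B =====
-- go(gs): take the first gender, filter out all its occurrences, count = length drop, recurse.
def pvGoCount : List String → List (String × Int)
  | [] => []
  | g :: gs =>
    (g, ((g :: gs).length : Int) - (((gs.filter (fun x => x ≠ g)).length : Int)))
      :: pvGoCount (gs.filter (fun x => x ≠ g))
termination_by gs => gs.length
decreasing_by
  rw [List.length_unattach]
  exact Nat.lt_succ_of_le (le_trans (List.length_filter_le _ _) (le_of_eq List.length_attach))

def count_users_by_gender_alt (data : List (String × List (List (String × String)))) : List (String × Int) :=
  match (PySem.Dict.ofList data).get? "results" with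
  | none => []   -- KeyError: excluded by Pre_
  | some users =>
    pvGoCount (users.filterMap (fun user => (PySem.Dict.ofList user).get? "gender"))

-- ===== PRECONDITION & SPEC =====
-- Pre_ excludes exactly the inputs where Python A raises KeyError: a missing "results" key, or a
-- user dict without a "gender" key.
def Pre_count_users_by_gender (data : List (String × List (List (String × String)))) : Prop :=
  ((PySem.Dict.ofList data).get? "results").isSome = true ∧
  ∀ u ∈ (PySem.Dict.ofList data).getD "results" [], ((PySem.Dict.ofList u).get? "gender").isSome = true
instance (data : List (String × List (List (String × String)))) : Decidable (Pre_count_users_by_gender data) := by unfold Pre_count_users_by_gender; infer_instance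
def pvWitness_count_users_by_gender : (List (String × List (List (String × String)))) :=
  [("results", [[("gender", "male")], [("gender", "female")], [("gender", "male")]])]
def Spec_count_users_by_gender (data : List (String × List (List (String × String)))) (out : List (String × Int)) : Prop := out = count_users_by_gender_alt data
instance (data : List (String × List (List (String × String)))) (out : List (String × Int)) : Decidable (Spec_count_users_by_gender data out) := by unfold Spec_count_users_by_gender; infer_instance

-- ===== CLAIM (what is proved, stated in full; the proofs are below) =====
def Claim_equal_count_users_by_gender : Prop := ∀ (data : List (String × List (List (String × String)))), Dom_count_users_by_gender data → Pre_count_users_by_gender data → Spec_count_users_by_gender data (count_users_by_gender data)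

-- ===== LEMMAS AND PROOFS =====

-- A's loop over users, when every user has a gender, is the counter fold over the gender list.
lemma foldA_eq_counter_fold (users : List (List (String × String)))
    (h : ∀ u ∈ users, ((PySem.Dict.ofList u).get? "gender").isSome = true)
    (d : PySem.Dict String Int) :
    users.foldl (fun (result : PySem.Dict String Int) user =>
        match (PySem.Dict.ofList user).get? "gender" with
        | none => result
        | some gender =>
          if result.contains gender then
            result.insert gender (result.getD gender 0 + 1)
          else
            result.insert gender 1) d
    = (users.filterMap (fun user => (PySem.Dict.ofList user).get? "gender")).foldl
        (fun (r : PySem.Dict String Int) g => r.insert g (r.getD g 0 + 1)) d := by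
  induction users generalizing d with
  | nil => rfl
  | cons u rest ih =>
    obtain ⟨g, hg⟩ := Option.isSome_iff_exists.mp (h u (List.mem_cons_self ..))
    simp only [List.foldl_cons, List.filterMap_cons, hg]
    rw [ih (fun v hv => h v (List.mem_cons_of_mem _ hv))]
    congr 1
    by_cases hc : d.contains g
    · simp [hc]
    · rw [PySem.Dict.getD_of_not_contains d 0 (by simpa using hc)]
      simp [hc]

lemma add_mem_eq (acc : List String) (x : String) (hx : x ∈ acc) :
    PySem.Set.add acc x = acc := by
  simp [PySem.Set.add, PySem.Set.contains, hx]

lemma add_cons (acc : List String) (g x : String) (hx : x ≠ g) :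
    PySem.Set.add (g :: acc) x = g :: PySem.Set.add acc x := by
  simp [PySem.Set.add, PySem.Set.contains, hx]
  split <;> rfl

lemma foldl_add_filter (g : String) (t acc : List String) (hg : g ∈ acc) :
    t.foldl PySem.Set.add acc = (t.filter (fun x => x ≠ g)).foldl PySem.Set.add acc := by
  induction t generalizing acc with
  | nil => rfl
  | cons x t ih =>
    by_cases hx : x = g
    · subst hx
      simp [add_mem_eq acc x hg, ih acc hg]
    · have hmem : g ∈ PySem.Set.add acc x := by
        unfold PySem.Set.add
        split
        · exact hg
        · exact List.mem_append_left _ hg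
      rw [List.filter_cons, if_pos (by simp [hx])]
      simp only [List.foldl_cons]
      exact ih _ hmem

lemma foldl_add_head (g : String) (t acc : List String) (ht : ∀ x ∈ t, x ≠ g) :
    t.foldl PySem.Set.add (g :: acc) = g :: t.foldl PySem.Set.add acc := by
  induction t generalizing acc with
  | nil => rfl
  | cons x t ih =>
    simp only [List.foldl_cons, add_cons acc g x (ht x (List.mem_cons_self ..))]
    exact ih _ (fun y hy => ht y (List.mem_cons_of_mem _ hy))

lemma ofList_cons_filter (g : String) (t : List String) :
    PySem.Set.ofList (g :: t) = g :: PySem.Set.ofList (t.filter (fun x => x ≠ g)) := by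
  show (g :: t).foldl PySem.Set.add [] = _
  rw [List.foldl_cons]
  have h1 : PySem.Set.add ([] : List String) g = [g] := rfl
  rw [h1, foldl_add_filter g t [g] (by simp)]
  rw [foldl_add_head g _ [] (fun x hx => by simpa using (List.mem_filter.mp hx).2)]
  rfl

lemma count_filter_ne (t : List String) (g k : String) (hk : k ≠ g) :
    (t.filter (fun x => x ≠ g)).count k = t.count k :=
  List.count_filter (by simp [hk])

lemma length_add_count (g : String) (t : List String) :
    t.length = (t.filter (fun x => x ≠ g)).length + t.count g := by
  induction t with
  | nil => rfl
  | cons x t ih =>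
    by_cases hx : x = g
    · subst hx
      simp [ih]
      omega
    · simp [hx, ih]
      omega

lemma length_sub_filter (g : String) (t : List String) :
    (((g :: t).length : Int) - ((t.filter (fun x => x ≠ g)).length : Int))
      = ((g :: t).count g : Int) := by
  have h := length_add_count g t
  simp only [List.count_cons_self, List.length_cons]
  push_cast [h]
  ring

-- Counter items (first-occurrence keys with their counts) = B's partition-and-count recursion.
lemma counter_items_aux (n : Nat) : ∀ gs : List String, gs.length ≤ n →
    (PySem.Set.ofList gs).map (fun k => (k, (gs.count k : Int))) = pvGoCount gs := by
  induction n with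
  | zero =>
    intro gs h
    have : gs = [] := List.eq_nil_of_length_eq_zero (Nat.le_zero.mp h)
    subst this
    simp [pvGoCount]
  | succ n ih =>
    intro gs h
    match gs with
    | [] => simp [pvGoCount]
    | g :: t =>
      have hlen : (t.filter (fun x => x ≠ g)).length ≤ n :=
        le_trans (List.length_filter_le _ _) (by simpa using h)
      rw [pvGoCount, ofList_cons_filter g t, List.map_cons,
        ← ih (t.filter (fun x => x ≠ g)) hlen, ← length_sub_filter]
      congr 1
      refine List.map_congr_left (fun k hk => ?_)
      have hk' : k ≠ g := by
        have h1 := (PySem.Set.mem_ofList _ _).mp hk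
        simpa using (List.mem_filter.mp h1).2
      rw [count_filter_ne t g k hk']
      simp [Ne.symm hk']

lemma counter_items_eq_goCount (gs : List String) :
    (PySem.Set.ofList gs).map (fun k => (k, (gs.count k : Int))) = pvGoCount gs :=
  counter_items_aux gs.length gs le_rfl

-- ===== VERDICT (by name: the statement is the Claim_ definition above) =====
theorem count_users_by_gender_spec : Claim_equal_count_users_by_gender := by
  intro data _hdom hpre
  obtain ⟨hres, hall⟩ := hpre
  obtain ⟨users, hu⟩ := Option.isSome_iff_exists.mp hres
  unfold Spec_count_users_by_gender count_users_by_gender count_users_by_gender_alt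
  rw [hu]
  dsimp only
  have hall' : ∀ u ∈ users, ((PySem.Dict.ofList u).get? "gender").isSome = true := by
    intro u hmem
    exact hall u (by rw [PySem.Dict.getD_of_get?_eq_some _ [] hu]; exact hmem)
  rw [foldA_eq_counter_fold users hall' PySem.Dict.empty]
  rw [PySem.Dict.foldl_insert_getD_add_one_eq_counter, PySem.Dict.items_counter,
    counter_items_eq_goCount]
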